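-- pv_equiv track=rewrite | github.com/lewisir/Advent-of-Code-2025 | Day6/aoc_day6.py | find_common_space_positions
-- ===== SOURCE A (Python) =====
-- def find_common_space_positions(data):
--     """return a list of the positions of the spaces that are common across all lines"""
--     common_space_positions_list = []
--     for line in data:
--         line_space_positions = set()
--         for index, char in enumerate(line):
--             if char == " ":
--                 line_space_positions.add(index)
--         common_space_positions_list.append(line_space_positions)
--     common_space_positions_set = common_space_positions_list[0]
--     for index in range(1, len(common_space_positions_list)):
--         common_space_positions_set.intersection_update(
--             common_space_positions_list[index]
--         )
--     common_space_positions = list(common_space_positions_set)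
--     common_space_positions.sort()
--     return common_space_positions
-- ===== SOURCE B (Python) =====
-- def find_common_space_positions(data):
--     """return a list of the positions of the spaces that are common across all lines"""
--     result = []
--     for col in range(len(data[0])):
--         if all(col < len(line) and line[col] == " " for line in data):
--             result.append(col)
--     return result
-- ===== Notes on version B (the rewrite author's own statement) =====
-- stated objective: simpler
-- what changed: Replaces A's per-line space-position sets, iterated set intersection and final sort by a single column-driven scan over range(len(data[0])) that appends a column when every line has a space there; the result is already ascending so no sets, hashing or sort are needed.
import Mathlib
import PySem

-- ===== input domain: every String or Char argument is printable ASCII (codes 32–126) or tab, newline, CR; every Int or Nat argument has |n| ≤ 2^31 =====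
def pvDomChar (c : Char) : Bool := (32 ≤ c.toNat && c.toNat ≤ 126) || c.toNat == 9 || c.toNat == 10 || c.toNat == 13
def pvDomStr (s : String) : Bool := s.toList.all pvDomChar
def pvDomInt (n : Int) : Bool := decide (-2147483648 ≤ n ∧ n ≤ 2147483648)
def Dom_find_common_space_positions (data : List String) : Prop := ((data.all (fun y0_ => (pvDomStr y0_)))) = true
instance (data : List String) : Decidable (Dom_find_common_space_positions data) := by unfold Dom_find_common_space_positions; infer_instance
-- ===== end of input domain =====

-- B replaces A's per-line sets + iterated intersection + sort by one column-driven scan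
-- of range(len(data[0])) testing every line; simpler, no sort needed (result value only).

-- ===== PORT A =====
-- per-line inner loop: for index, char in enumerate(line): if char == ' ': add index
def pvSpaceSet (line : List Char) : PySem.Set Int :=
  (PySem.List.enumerate line 0).foldl
    (fun s p => if p.2 = ' ' then PySem.Set.add s p.1 else s) PySem.Set.empty

def find_common_space_positions (data : List String) : List Int :=
  let lists := data.foldl (fun acc line => acc ++ [pvSpaceSet line.toList]) []
  match PySem.List.pyGet? lists 0 with        -- lists[0]: IndexError on empty data (excluded by Pre_)
  | none => []
  | some s0 =>
    let s := (PySem.List.pyRange 1 (lists.length : Int) 1).foldl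
      (fun s i => PySem.Set.inter s (PySem.List.pyGetD lists i PySem.Set.empty)) s0
    PySem.List.sorted s (fun x => x) false

-- ===== PORT B =====
def find_common_space_positions_alt (data : List String) : List Int :=
  match data with
  | [] => []                                  -- len(data[0]): IndexError in Python (excluded by Pre_)
  | line0 :: _ =>
    (PySem.List.pyRange 0 (line0.toList.length : Int) 1).foldl
      (fun res col =>
        if data.all (fun line => decide (col < (line.toList.length : Int)) &&
            (PySem.List.pyGet? line.toList col == some ' ')) then res ++ [col] else res) []

-- ===== PRECONDITION & SPEC =====
-- A raises IndexError on empty data (data[0]); excluded.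
def Pre_find_common_space_positions (data : List String) : Prop := data ≠ []
instance (data : List String) : Decidable (Pre_find_common_space_positions data) := by
  unfold Pre_find_common_space_positions; infer_instance
def pvWitness_find_common_space_positions : List String := [" a ", "ba "]

def Spec_find_common_space_positions (data : List String) (out : List Int) : Prop := out = find_common_space_positions_alt data
instance (data : List String) (out : List Int) : Decidable (Spec_find_common_space_positions data out) := by unfold Spec_find_common_space_positions; infer_instance

-- ===== CLAIM (what is proved, stated in full; the proofs are below) =====
def Claim_equal_find_common_space_positions : Prop := ∀ (data : List String), Dom_find_common_space_positions data → Pre_find_common_space_positions data → Spec_find_common_space_positions data (find_common_space_positions data)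

-- ===== LEMMAS AND PROOFS =====

-- membership in the inner enumerate/add fold
theorem pv_mem_foldl_add (e : List (Int × Char)) (acc : List Int) (x : Int) :
    x ∈ e.foldl (fun s p => if p.2 = ' ' then PySem.Set.add s p.1 else s) acc ↔
      x ∈ acc ∨ ∃ p ∈ e, p.2 = ' ' ∧ x = p.1 := by
  induction e generalizing acc with
  | nil => simp
  | cons p e ih =>
    by_cases h : p.2 = ' ' <;> simp [h, ih, PySem.Set.mem_add] <;> tauto

theorem pv_nodup_foldl_add (e : List (Int × Char)) (acc : PySem.Set Int) (h : acc.Nodup) :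
    (e.foldl (fun s p => if p.2 = ' ' then PySem.Set.add s p.1 else s) acc).Nodup := by
  induction e generalizing acc with
  | nil => exact h
  | cons p e ih =>
    by_cases hp : p.2 = ' ' <;> simp [hp] <;> exact ih _ (by first | exact PySem.Set.nodup_add _ _ h | exact h)

theorem pv_mem_spaceSet (l : List Char) (x : Int) :
    x ∈ pvSpaceSet l ↔ ∃ k : Nat, ∃ _ : k < l.length, l[k] = ' ' ∧ x = (k : Int) := by
  unfold pvSpaceSet
  rw [pv_mem_foldl_add]
  constructor
  · rintro (h | ⟨p, hp, hc, hx⟩)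
    · simp [PySem.Set.empty] at h
    · obtain ⟨k, hk, rfl⟩ := (PySem.List.mem_enumerate_iff l 0 p).mp hp
      exact ⟨k, hk, hc, by simpa using hx⟩
  · rintro ⟨k, hk, hc, hx⟩
    exact Or.inr ⟨(0 + (k : Int), l[k]), (PySem.List.mem_enumerate_iff l 0 _).mpr ⟨k, hk, rfl⟩, hc, by simpa using hx⟩

theorem pv_nodup_spaceSet (l : List Char) : (pvSpaceSet l).Nodup :=
  pv_nodup_foldl_add _ _ List.nodup_nil

-- membership / nodup through the intersection fold
theorem pv_mem_inter_foldl (sets : List (PySem.Set Int)) (s0 : PySem.Set Int) (x : Int) :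
    x ∈ sets.foldl (fun s t => PySem.Set.inter s t) s0 ↔ x ∈ s0 ∧ ∀ t ∈ sets, x ∈ t := by
  induction sets generalizing s0 with
  | nil => simp
  | cons t sets ih => simp [ih, PySem.Set.mem_inter]; tauto

theorem pv_nodup_inter_foldl (sets : List (PySem.Set Int)) (s0 : PySem.Set Int) (h : s0.Nodup) :
    (sets.foldl (fun s t => PySem.Set.inter s t) s0).Nodup := by
  induction sets generalizing s0 with
  | nil => exact h
  | cons t sets ih => exact ih _ (PySem.Set.nodup_inter _ _ h)

-- bridge: the ∃-form of "line has a space at column x" vs B's guarded probe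
theorem pv_space_iff (l : List Char) (x : Int) (hx : 0 ≤ x) :
    (∃ k : Nat, ∃ _ : k < l.length, l[k] = ' ' ∧ x = (k : Int)) ↔
      (x < (l.length : Int) ∧ PySem.List.pyGet? l x = some ' ') := by
  constructor
  · rintro ⟨k, hk, hc, rfl⟩
    refine ⟨by exact_mod_cast hk, ?_⟩
    rw [PySem.List.pyGet?_natCast]
    simp [hk, hc]
  · rintro ⟨hlt, hget⟩
    lift x to ℕ using hx with k
    rw [PySem.List.pyGet?_natCast] at hget
    have hk : k < l.length := by exact_mod_cast hlt
    exact ⟨k, hk, by simpa [List.getElem?_eq_getElem hk] using hget, rfl⟩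

theorem find_common_space_positions_spec_aux (line0 : String) (rest : List String) :
    find_common_space_positions (line0 :: rest) = find_common_space_positions_alt (line0 :: rest) := by
  set data := line0 :: rest with hdata
  -- A side
  have hlists : data.foldl (fun acc line => acc ++ [pvSpaceSet line.toList]) [] =
      data.map (fun line => pvSpaceSet line.toList) := by
    simpa using PySem.List.foldl_append_singleton_eq_map (fun line => pvSpaceSet line.toList) data []
  unfold find_common_space_positions find_common_space_positions_alt
  rw [hdata] at hlists ⊢
  simp only [hlists]
  rw [show PySem.List.pyGet? ((line0 :: rest).map (fun line => pvSpaceSet line.toList)) 0 =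
      some (pvSpaceSet line0.toList) from by
    simpa using PySem.List.pyGet?_natCast ((line0 :: rest).map (fun line => pvSpaceSet line.toList)) 0]
  have hfold := PySem.List.foldl_pyRange_pyGetD'
      ((line0 :: rest).map (fun line => pvSpaceSet line.toList)) PySem.Set.empty
      (fun s t => PySem.Set.inter s t) (pvSpaceSet line0.toList) (a := 1) (by norm_num)
  simp only [hfold]
  simp only [show (1:Int).toNat = 1 from rfl, List.map_cons, List.drop_succ_cons, List.drop_zero]
  -- name the sets
  set S := (rest.map (fun line => pvSpaceSet line.toList)).foldl
      (fun s t => PySem.Set.inter s t) (pvSpaceSet line0.toList) with hS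
  -- B side: the fold is a filter of the range
  rw [PySem.List.foldl_append_if_eq_filter]
  set p : Int → Bool := fun col =>
    (line0 :: rest).all (fun line => decide (col < (line.toList.length : Int)) &&
      (PySem.List.pyGet? line.toList col == some ' ')) with hp
  simp only [List.nil_append]
  -- membership characterisation of S
  have hmemS : ∀ x : Int, x ∈ S ↔
      ∀ line ∈ (line0 :: rest), ∃ k : Nat, ∃ _ : k < line.toList.length,
        line.toList[k] = ' ' ∧ x = (k : Int) := by
    intro x
    rw [hS, pv_mem_inter_foldl, pv_mem_spaceSet]
    simp [pv_mem_spaceSet]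
  -- membership in the filtered range
  have hmemF : ∀ x : Int, x ∈ (PySem.List.pyRange 0 (line0.toList.length : Int) 1).filter p ↔ x ∈ S := by
    intro x
    rw [List.mem_filter, PySem.List.mem_pyRange_one, hmemS]
    constructor
    · rintro ⟨⟨hx0, _⟩, hpx⟩
      intro line hline
      rw [hp] at hpx; simp only [List.all_eq_true] at hpx
      have := hpx line hline
      simp only [Bool.and_eq_true, decide_eq_true_eq, beq_iff_eq] at this
      exact (pv_space_iff line.toList x hx0).mpr this
    · intro h
      have h0 := h line0 (by simp)
      obtain ⟨k, hk, _, rfl⟩ := h0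
      refine ⟨⟨by positivity, by exact_mod_cast hk⟩, ?_⟩
      rw [hp]; simp only [List.all_eq_true]
      intro line hline
      have := (pv_space_iff line.toList (k : Int) (by positivity)).mp (h line hline)
      simp only [Bool.and_eq_true, decide_eq_true_eq, beq_iff_eq]
      exact this
  -- both sides nodup, same members ⇒ Perm; filtered range is strictly increasing ⇒ it is the sort
  have hnodupS : S.Nodup := pv_nodup_inter_foldl _ _ (pv_nodup_spaceSet _)
  have hnodupF : ((PySem.List.pyRange 0 (line0.toList.length : Int) 1).filter p).Nodup :=
    (PySem.List.nodup_pyRange_one _ _).filter _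
  have hperm : ((PySem.List.pyRange 0 (line0.toList.length : Int) 1).filter p).Perm S :=
    (List.perm_ext_iff_of_nodup hnodupF hnodupS).mpr hmemF
  have hpair : ((PySem.List.pyRange 0 (line0.toList.length : Int) 1).filter p).Pairwise (· < ·) :=
    (PySem.List.pairwise_lt_pyRange_one _ _).filter _
  exact PySem.List.sorted_eq_of_perm_of_pairwise_lt _ _ _ hperm hpair

-- ===== VERDICT (by name: the statement is the Claim_ definition above) =====
theorem find_common_space_positions_spec : Claim_equal_find_common_space_positions := by
  intro data _ hpre
  unfold Spec_find_common_space_positions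
  match data, hpre with
  | line0 :: rest, _ => exact find_common_space_positions_spec_aux line0 rest
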